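-- pv_equiv track=rewrite | github.com/enrique-dealba/clouds | frontend/detection_app.py | reorder_ground_truth
-- ===== SOURCE A (Python) =====
-- from typing import Dict, List, Optional
--
-- def reorder_ground_truth(labels: List[int]) -> List[int]:
--     """Reorder ground truth labels to match visualization regions."""
--     if len(labels) != 33:
--         return labels
--
--     # Keep the center (first value) as is
--     center = labels[0]
--
--     # Reorder outer segments
--     outer_segments = labels[1:]
--
--     segments_per_ring = 8
--     rotation_offset = 4  # Increased from 3 to 4 for ~30° more clockwise rotation
--
--     reordered = [center]  # Start with center
--
--     # Process each ring (4 rings, 8 segments each)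
--     for ring in range(4):
--         start_idx = ring * segments_per_ring
--         ring_segments = outer_segments[start_idx : start_idx + segments_per_ring]
--
--         # Rotate segments in this ring
--         rotated_segments = (
--             ring_segments[rotation_offset:] + ring_segments[:rotation_offset]
--         )
--
--         # Reverse the segments to reverse symmetry (left-right symmetry)
--         rotated_segments = rotated_segments[::-1]
--
--         reordered.extend(rotated_segments)
--
--     return reordered
-- ===== SOURCE B (Python) =====
-- # Single index-mapping pass driven by a precomputed 32-entry permutation table.
-- _PERM = [r * 8 + (3 - j) % 8 for r in range(4) for j in range(8)]
--
-- def reorder_ground_truth(labels):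
--     """Reorder ground truth labels to match visualization regions."""
--     if len(labels) != 33:
--         return labels
--     return [labels[0]] + [labels[1 + p] for p in _PERM]
-- ===== Notes on version B (the rewrite author's own statement) =====
-- stated objective: alternative
-- what changed: Replaces the four per-ring slice/rotate/reverse passes with one precomputed 32-entry permutation table and a single index-mapping pass.
import Mathlib
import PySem

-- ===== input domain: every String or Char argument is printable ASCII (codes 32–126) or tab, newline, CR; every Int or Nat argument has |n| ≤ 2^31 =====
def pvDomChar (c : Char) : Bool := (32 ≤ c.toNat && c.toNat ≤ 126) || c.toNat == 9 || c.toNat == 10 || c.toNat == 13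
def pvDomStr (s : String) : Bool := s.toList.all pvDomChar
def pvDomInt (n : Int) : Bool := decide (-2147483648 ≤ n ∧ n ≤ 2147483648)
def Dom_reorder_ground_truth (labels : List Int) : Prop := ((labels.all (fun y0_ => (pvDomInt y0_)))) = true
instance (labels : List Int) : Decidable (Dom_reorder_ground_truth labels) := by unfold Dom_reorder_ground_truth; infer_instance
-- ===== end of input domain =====

-- B replaces A's four slice/rotate/reverse ring passes by a single index-mapping pass over a
-- precomputed 32-entry permutation table (objective: simpler/alternative, same cost).

-- ===== PORT A =====
def reorder_ground_truth (labels : List Int) : List Int :=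
  if labels.length ≠ 33 then labels
  else
    let center := PySem.List.pyGetD labels 0 0         -- labels[0]; in range since length = 33
    let outer_segments := PySem.List.slice labels (some 1) none   -- labels[1:]
    -- for ring in range(4): slice, rotate by 4, reverse ([::-1] ported as List.reverse — exact), extend
    (PySem.List.pyRange 0 4 1).foldl (fun reordered ring =>
      let start_idx := ring * 8
      let ring_segments := PySem.List.slice outer_segments (some start_idx) (some (start_idx + 8))
      let rotated_segments :=
        PySem.List.slice ring_segments (some 4) none ++ PySem.List.slice ring_segments none (some 4)
      let rotated_segments := rotated_segments.reverse
      reordered ++ rotated_segments) [center]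

-- ===== PORT B =====
-- the fixed permutation table _PERM = [r*8 + (3-j)%8 for r in range(4) for j in range(8)]
def pvPerm : List Int :=
  (PySem.List.pyRange 0 4 1).flatMap (fun r =>
    (PySem.List.pyRange 0 8 1).map (fun j => r * 8 + PySem.Int.mod (3 - j) 8))

def reorder_ground_truth_alt (labels : List Int) : List Int :=
  if labels.length ≠ 33 then labels
  else
    PySem.List.pyGetD labels 0 0 ::
      pvPerm.map (fun p => PySem.List.pyGetD labels (1 + p) 0)   -- labels[1+p]; in range since length = 33

-- ===== PRECONDITION & SPEC =====
def Spec_reorder_ground_truth (labels : List Int) (out : List Int) : Prop := out = reorder_ground_truth_alt labels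
instance (labels : List Int) (out : List Int) : Decidable (Spec_reorder_ground_truth labels out) := by unfold Spec_reorder_ground_truth; infer_instance

-- ===== CLAIM (what is proved, stated in full; the proofs are below) =====
def Claim_equal_reorder_ground_truth : Prop := ∀ (labels : List Int), Dom_reorder_ground_truth labels → Spec_reorder_ground_truth labels (reorder_ground_truth labels)

-- ===== LEMMAS AND PROOFS =====
set_option maxHeartbeats 1000000 in
theorem pv_eq (labels : List Int) :
    reorder_ground_truth labels = reorder_ground_truth_alt labels := by
  by_cases h : labels.length = 33
  · -- destruct the 33-element list and evaluate both ports by reduction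
    rcases labels with _|⟨a0, labels⟩
    · simp at h
    rcases labels with _|⟨a1, labels⟩
    · simp at h
    rcases labels with _|⟨a2, labels⟩
    · simp at h
    rcases labels with _|⟨a3, labels⟩
    · simp at h
    rcases labels with _|⟨a4, labels⟩
    · simp at h
    rcases labels with _|⟨a5, labels⟩
    · simp at h
    rcases labels with _|⟨a6, labels⟩
    · simp at h
    rcases labels with _|⟨a7, labels⟩
    · simp at h
    rcases labels with _|⟨a8, labels⟩
    · simp at h
    rcases labels with _|⟨a9, labels⟩
    · simp at h
    rcases labels with _|⟨a10, labels⟩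
    · simp at h
    rcases labels with _|⟨a11, labels⟩
    · simp at h
    rcases labels with _|⟨a12, labels⟩
    · simp at h
    rcases labels with _|⟨a13, labels⟩
    · simp at h
    rcases labels with _|⟨a14, labels⟩
    · simp at h
    rcases labels with _|⟨a15, labels⟩
    · simp at h
    rcases labels with _|⟨a16, labels⟩
    · simp at h
    rcases labels with _|⟨a17, labels⟩
    · simp at h
    rcases labels with _|⟨a18, labels⟩
    · simp at h
    rcases labels with _|⟨a19, labels⟩
    · simp at h
    rcases labels with _|⟨a20, labels⟩
    · simp at h
    rcases labels with _|⟨a21, labels⟩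
    · simp at h
    rcases labels with _|⟨a22, labels⟩
    · simp at h
    rcases labels with _|⟨a23, labels⟩
    · simp at h
    rcases labels with _|⟨a24, labels⟩
    · simp at h
    rcases labels with _|⟨a25, labels⟩
    · simp at h
    rcases labels with _|⟨a26, labels⟩
    · simp at h
    rcases labels with _|⟨a27, labels⟩
    · simp at h
    rcases labels with _|⟨a28, labels⟩
    · simp at h
    rcases labels with _|⟨a29, labels⟩
    · simp at h
    rcases labels with _|⟨a30, labels⟩
    · simp at h
    rcases labels with _|⟨a31, labels⟩
    · simp at h
    rcases labels with _|⟨a32, labels⟩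
    · simp at h
    rcases labels with _|⟨x, labels⟩
    · simp [reorder_ground_truth, reorder_ground_truth_alt, pvPerm, PySem.List.pyRange,
        PySem.List.slice, PySem.List.pyGetD, PySem.List.pyGet?, PySem.List.pyIdx?,
        PySem.Int.mod, List.range_succ, PySem.List.clampIdx]
    · simp at h
  · simp [reorder_ground_truth, reorder_ground_truth_alt, h]

-- ===== VERDICT (by name: the statement is the Claim_ definition above) =====
set_option maxHeartbeats 1000000 in
theorem reorder_ground_truth_spec : Claim_equal_reorder_ground_truth := by
  intro labels _
  unfold Spec_reorder_ground_truth
  exact pv_eq labels
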